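-- pv_equiv track=rewrite | github.com/KarakaCharmi/Major-Project | backend/main.py | is_out_of_doc_answer
-- ===== SOURCE A (Python) =====
-- def is_out_of_doc_answer(text: str) -> bool:
--     """Heuristically detect when the LLM indicates the answer isn't in the provided context/document.
--     This helps us surface the y/n general-knowledge prompt even when reranked context existed but lacked the answer.
--     """
--     low = (text or "").strip().lower()
--     if not low:
--         return False
--     patterns = [
--         "not in the context",
--         "context provided does not contain",
--         "provided context does not contain",
--         "does not contain information",
--         "doesn't contain information",
--         "i couldn't find",
--         "i could not find",
--         "couldn't find in your document",
--         "could not find in your document",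
--         "not found in your document",
--         "not found in the document",
--         "no relevant information",
--         "not available in the document",
--         "outside the document",
--         "outside of the document",
--         "not present in the document",
--     ]
--     return any(p in low for p in patterns)
-- ===== SOURCE B (Python) =====
-- def is_out_of_doc_answer(text: str) -> bool:
--     """NFA-style multi-pattern scan: one forward pass over the normalized text,
--     maintaining the set of partially matched pattern suffixes (no substring search)."""
--     low = (text or "").strip().lower()
--     patterns = [
--         "not in the context",
--         "context provided does not contain",
--         "provided context does not contain",
--         "does not contain information",
--         "doesn't contain information",
--         "i couldn't find",
--         "i could not find",
--         "couldn't find in your document",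
--         "could not find in your document",
--         "not found in your document",
--         "not found in the document",
--         "no relevant information",
--         "not available in the document",
--         "outside the document",
--         "outside of the document",
--         "not present in the document",
--     ]
--     states = []  # remaining suffixes of patterns currently being matched
--     for ch in low:
--         nxt = []
--         for s in states + patterns:
--             if s and s[0] == ch:
--                 nxt.append(s[1:])
--         if "" in nxt:
--             return True
--         states = nxt
--     return False
-- ===== Notes on version B (the rewrite author's own statement) =====
-- stated objective: alternative
-- what changed: B replaces A's sixteen independent substring searches (any(p in low)) by a single forward pass over the text that simulates a multi-pattern NFA, carrying the set of partially matched pattern suffixes and never calling a substring search.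
import Mathlib
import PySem

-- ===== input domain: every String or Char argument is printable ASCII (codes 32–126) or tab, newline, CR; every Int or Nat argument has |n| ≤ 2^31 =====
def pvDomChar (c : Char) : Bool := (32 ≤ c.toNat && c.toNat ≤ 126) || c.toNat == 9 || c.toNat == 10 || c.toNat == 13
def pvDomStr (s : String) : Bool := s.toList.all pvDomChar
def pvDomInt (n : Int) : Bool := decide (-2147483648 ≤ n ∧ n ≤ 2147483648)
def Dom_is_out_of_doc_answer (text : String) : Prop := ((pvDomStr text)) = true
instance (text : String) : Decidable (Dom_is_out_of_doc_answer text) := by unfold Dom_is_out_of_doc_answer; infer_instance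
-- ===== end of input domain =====

-- B: a single forward pass simulating a multi-pattern NFA (set of partially matched
-- pattern suffixes), instead of A's per-pattern substring searches; alternative structure.


def pvPatterns : List String := [
  "not in the context",
  "context provided does not contain",
  "provided context does not contain",
  "does not contain information",
  "doesn't contain information",
  "i couldn't find",
  "i could not find",
  "couldn't find in your document",
  "could not find in your document",
  "not found in your document",
  "not found in the document",
  "no relevant information",
  "not available in the document",
  "outside the document",
  "outside of the document",
  "not present in the document"
]

-- ===== PORT A =====
def is_out_of_doc_answer (text : String) : Bool :=
  let low := PySem.Str.lower (PySem.Str.strip text)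
  if PySem.Str.len low == 0 then false
  else pvPatterns.any (fun p => PySem.Str.isIn p low)

-- ===== PORT B =====
-- the pattern list as char lists (B iterates over characters)
def pvPatternsL : List (List Char) := pvPatterns.map String.toList

-- the loop body: advance every state in `states ++ patterns` by the character c,
-- return true as soon as some pattern is fully consumed ("" in nxt)
def pvScan (states : List (List Char)) : List Char → Bool
  | [] => false
  | c :: rest =>
    let nxt := (states ++ pvPatternsL).filterMap (fun s =>
      match s with
      | x :: xs => if x = c then some xs else none
      | [] => none)
    if nxt.contains [] then true else pvScan nxt rest

def is_out_of_doc_answer_alt (text : String) : Bool :=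
  let low := PySem.Str.lower (PySem.Str.strip text)
  pvScan [] low.toList

-- ===== PRECONDITION & SPEC =====
def Spec_is_out_of_doc_answer (text : String) (out : Bool) : Prop := out = is_out_of_doc_answer_alt text
instance (text : String) (out : Bool) : Decidable (Spec_is_out_of_doc_answer text out) := by unfold Spec_is_out_of_doc_answer; infer_instance

-- ===== CLAIM =====
def Claim_equal_is_out_of_doc_answer : Prop := ∀ (text : String), Dom_is_out_of_doc_answer text → Spec_is_out_of_doc_answer text (is_out_of_doc_answer text)

-- ===== LEMMAS AND PROOFS =====

lemma pvPatternsL_ne_nil : ∀ p ∈ pvPatternsL, p ≠ [] := by decide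

-- invariant of the NFA scan: it succeeds iff some live state completes inside l,
-- or some pattern occurs (as a prefix of some suffix) inside l
lemma pvScan_iff (l : List Char) : ∀ (states : List (List Char)),
    pvScan states l = true ↔
      (∃ s ∈ states, s ≠ [] ∧ s <+: l) ∨
      (∃ p ∈ pvPatternsL, ∃ i, p <+: l.drop i) := by
  induction l with
  | nil =>
    intro states
    simp only [pvScan, List.drop_nil]
    constructor
    · intro h; cases h
    · rintro (⟨s, _, hne, hpre⟩ | ⟨p, hp, _, hpre⟩)
      · exact absurd (List.prefix_nil.mp hpre) hne
      · exact absurd (List.prefix_nil.mp hpre) (pvPatternsL_ne_nil p hp)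
  | cons c rest ih =>
    intro states
    simp only [pvScan]
    set nxt := (states ++ pvPatternsL).filterMap (fun s =>
      match s with
      | x :: xs => if x = c then some xs else none
      | [] => none) with hnxt
    have mem_nxt : ∀ t, t ∈ nxt ↔ (c :: t) ∈ states ++ pvPatternsL := by
      intro t
      rw [hnxt, List.mem_filterMap]
      constructor
      · rintro ⟨s, hs, hmap⟩
        match s with
        | [] => simp at hmap
        | x :: xs =>
          by_cases hx : x = c
          · subst hx
            simp only [if_true, Option.some.injEq] at hmap
            subst hmap; exact hs
          · simp [hx] at hmap
      · intro h; exact ⟨c :: t, h, by simp⟩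
    -- a nonempty state s matches c::rest iff it steps to some t with t <+: rest
    have step_iff : ∀ S : List (List Char),
        (∃ s ∈ S, s ≠ [] ∧ s <+: c :: rest) ↔
        (∃ t, (c :: t) ∈ S ∧ t <+: rest) := by
      intro S
      constructor
      · rintro ⟨s, hs, hne, hpre⟩
        match s, hne with
        | x :: xs, _ =>
          obtain ⟨hx, hxs⟩ := by
            rw [List.cons_prefix_cons] at hpre; exact hpre
          subst hx; exact ⟨xs, hs, hxs⟩
      · rintro ⟨t, ht, hpre⟩
        exact ⟨c :: t, ht, by simp, by rw [List.cons_prefix_cons]; exact ⟨rfl, hpre⟩⟩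
    constructor
    · intro h
      split at h
      · -- some pattern just completed: [] ∈ nxt, so c::[] ... gives a state/pattern prefix
        rename_i hc
        have h0 : ([] : List Char) ∈ nxt := by
          have := hc; rwa [List.contains_eq_mem, decide_eq_true_iff] at this
        have hmem := (mem_nxt []).mp h0
        rcases List.mem_append.mp hmem with hS | hP
        · exact Or.inl ⟨[c], hS, by simp, by simp⟩
        · exact Or.inr ⟨[c], hP, 0, by simp⟩
      · -- recurse
        rcases (ih nxt).mp h with ⟨t, ht, htne, htpre⟩ | ⟨p, hp, i, hpre⟩
        · have := (mem_nxt t).mp ht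
          rcases List.mem_append.mp this with hS | hP
          · exact Or.inl ((step_iff states).mpr ⟨t, hS, htpre⟩)
          · exact Or.inr ⟨c :: t, hP, 0, by simpa using htpre⟩
        · exact Or.inr ⟨p, hp, i + 1, by simpa using hpre⟩
    · intro h
      -- reduce to: [] ∈ nxt, or the IH's right-hand side for nxt
      have key : (∃ t ∈ nxt, t <+: rest) ∨ (∃ p ∈ pvPatternsL, ∃ i, p <+: rest.drop i) := by
        rcases h with hS | ⟨p, hp, i, hpre⟩
        · obtain ⟨t, ht, htpre⟩ := (step_iff states).mp hS
          exact Or.inl ⟨t, (mem_nxt t).mpr (List.mem_append.mpr (Or.inl ht)), htpre⟩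
        · match i with
          | 0 =>
            obtain ⟨t, ht, htpre⟩ := (step_iff pvPatternsL).mp ⟨p, hp, pvPatternsL_ne_nil p hp, by simpa using hpre⟩
            exact Or.inl ⟨t, (mem_nxt t).mpr (List.mem_append.mpr (Or.inr ht)), htpre⟩
          | i + 1 => exact Or.inr ⟨p, hp, i, by simpa using hpre⟩
      rcases key with ⟨t, ht, htpre⟩ | hP
      · match t with
        | [] =>
          have hcc : nxt.contains [] = true := by
            rw [List.contains_eq_mem, decide_eq_true_iff]; exact ht
          rw [if_pos hcc]
        | x :: xs =>
          split
          · rfl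
          · exact (ih nxt).mpr (Or.inl ⟨x :: xs, ht, by simp, htpre⟩)
      · split
        · rfl
        · exact (ih nxt).mpr (Or.inr hP)

lemma pv_any_eq_scan (l : List Char) :
    pvPatterns.any (fun p => PySem.Chars.isIn p.toList l) = pvScan [] l := by
  rw [Bool.eq_iff_iff, pvScan_iff]
  simp only [List.any_eq_true, pvPatternsL, List.mem_map]
  constructor
  · rintro ⟨p, hp, hin⟩
    obtain ⟨j, hpre⟩ := (PySem.Chars.exists_prefix_drop_iff_isIn p.toList l).2 hin
    exact Or.inr ⟨p.toList, ⟨p, hp, rfl⟩, j, hpre⟩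
  · rintro (⟨s, hs, _⟩ | ⟨q, ⟨p, hp, rfl⟩, i, hpre⟩)
    · simp at hs
    · exact ⟨p, hp, (PySem.Chars.exists_prefix_drop_iff_isIn p.toList l).1 ⟨i, hpre⟩⟩

-- ===== VERDICT =====
theorem is_out_of_doc_answer_spec : Claim_equal_is_out_of_doc_answer := by
  intro text _
  unfold Spec_is_out_of_doc_answer is_out_of_doc_answer is_out_of_doc_answer_alt
  simp only [PySem.Str.isIn]
  split
  · -- low is empty, so its char list is [] and the scan returns false immediately
    rename_i h
    have h0 : (PySem.Str.lower (PySem.Str.strip text)).toList = [] := by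
      have hl := PySem.Str.len_eq (PySem.Str.lower (PySem.Str.strip text))
      rw [beq_iff_eq] at h
      exact List.eq_nil_of_length_eq_zero (by omega)
    rw [h0]; rfl
  · rw [pv_any_eq_scan]
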